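-- pv_equiv track=rewrite | github.com/jmathes/ai-skills | skills/skill-authoring/scripts/lint_skills.py | count_code_block_lines
-- ===== SOURCE A (Python) =====
-- def count_code_block_lines(body: str) -> list[int]:
--     """Return list of line-counts for each fenced code block."""
--     blocks = []
--     in_block = False
--     count = 0
--     for line in body.splitlines():
--         if line.strip().startswith("```"):
--             if in_block:
--                 blocks.append(count)
--                 in_block = False
--                 count = 0
--             else:
--                 in_block = True
--                 count = 0
--         elif in_block:
--             count += 1
--     return blocks
-- ===== SOURCE B (Python) =====
-- def count_code_block_lines(body: str) -> list[int]:
--     """Return list of line-counts for each fenced code block."""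
--     positions = [i for i, line in enumerate(body.splitlines())
--                  if line.strip().startswith("```")]
--     blocks = []
--     while len(positions) >= 2:
--         blocks.append(positions[1] - positions[0] - 1)
--         positions = positions[2:]
--     return blocks
-- ===== Notes on version B (the rewrite author's own statement) =====
-- stated objective: alternative
-- what changed: Replaces A's running in_block/count state machine with a two-phase decomposition: collect all fence-line indices via one enumerate-filter pass, then pair consecutive indices and emit close-open-1 for each pair (an unpaired trailing fence is dropped automatically).
import Mathlib
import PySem

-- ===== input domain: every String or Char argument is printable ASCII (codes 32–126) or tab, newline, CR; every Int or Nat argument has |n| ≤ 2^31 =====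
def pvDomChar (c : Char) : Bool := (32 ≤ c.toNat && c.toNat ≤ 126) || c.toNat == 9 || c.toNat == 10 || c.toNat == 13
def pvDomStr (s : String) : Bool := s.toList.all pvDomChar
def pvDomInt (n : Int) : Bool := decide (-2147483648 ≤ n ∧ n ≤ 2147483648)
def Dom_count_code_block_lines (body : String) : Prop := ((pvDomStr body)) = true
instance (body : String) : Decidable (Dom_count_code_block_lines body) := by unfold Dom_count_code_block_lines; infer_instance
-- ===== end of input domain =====

-- B replaces A's running in_block/count state machine by collecting the indices of all
-- fence lines in one pass and pairing consecutive indices (close - open - 1); objective: alternative decomposition.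

-- ===== PORT A =====
-- line.strip().startswith("```")
def pvFence (line : String) : Bool := PySem.Str.startswith (PySem.Str.strip line) "```"

-- A's for-loop over the lines with state (blocks, in_block, count)
def pvLoopA : List String → List Int → Bool → Int → List Int
  | [], blocks, _, _ => blocks
  | line :: rest, blocks, in_block, count =>
    if pvFence line then
      if in_block then pvLoopA rest (blocks ++ [count]) false 0
      else pvLoopA rest blocks true 0
    else
      if in_block then pvLoopA rest blocks in_block (count + 1)
      else pvLoopA rest blocks in_block count

def count_code_block_lines (body : String) : List Int :=
  pvLoopA (PySem.Str.splitlines body) [] false 0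

-- ===== PORT B =====
-- positions = [i for i, line in enumerate(body.splitlines()) if line.strip().startswith("```")]
def pvPositions (lines : List String) : List Int :=
  ((PySem.List.enumerate lines 0).filter (fun p => pvFence p.2)).map (fun p => p.1)

-- while len(positions) >= 2: blocks.append(positions[1] - positions[0] - 1); positions = positions[2:]
def pvPairLoop : List Int → List Int
  | a :: b :: rest => (b - a - 1) :: pvPairLoop rest
  | _ => []

def count_code_block_lines_alt (body : String) : List Int :=
  pvPairLoop (pvPositions (PySem.Str.splitlines body))

-- ===== PRECONDITION & SPEC =====
def Spec_count_code_block_lines (body : String) (out : List Int) : Prop := out = count_code_block_lines_alt body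
instance (body : String) (out : List Int) : Decidable (Spec_count_code_block_lines body out) := by unfold Spec_count_code_block_lines; infer_instance

-- ===== CLAIM (what is proved, stated in full; the proofs are below) =====
def Claim_equal_count_code_block_lines : Prop := ∀ (body : String), Dom_count_code_block_lines body → Spec_count_code_block_lines body (count_code_block_lines body)

-- ===== LEMMAS AND PROOFS =====

-- fence positions of a line list, indices relative to the head of the list
def pvPos : List String → List Int
  | [] => []
  | l :: rest => if pvFence l then 0 :: (pvPos rest).map (· + 1) else (pvPos rest).map (· + 1)

theorem pvPositions_eq_pos (lines : List String) (s : Int) :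
    ((PySem.List.enumerate lines s).filter (fun p => pvFence p.2)).map (fun p => p.1)
      = (pvPos lines).map (· + s) := by
  induction lines generalizing s with
  | nil => simp [PySem.List.enumerate_nil, pvPos]
  | cons l rest ih =>
    by_cases h : pvFence l <;>
      simp [PySem.List.enumerate_cons, pvPos, h, ih (s + 1)] <;>
      exact fun a _ => by ring

-- pvPairLoop only uses differences, so it is invariant under a uniform shift
theorem pvPairLoop_shift (ps : List Int) (c : Int) :
    pvPairLoop (ps.map (· + c)) = pvPairLoop ps := by
  induction ps using pvPairLoop.induct with
  | case1 a b rest ih =>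
    simp only [List.map_cons, pvPairLoop, ih]
    congr 1; ring
  | case2 ps h =>
    cases ps with
    | nil => simp [pvPairLoop]
    | cons a t =>
      cases t with
      | nil => simp [pvPairLoop]
      | cons b r => exact absurd rfl (h a b r)

theorem pvPair_open (cnt : Int) (ps : List Int) :
    pvPairLoop ((-cnt - 1) :: 0 :: ps.map (· + 1)) = cnt :: pvPairLoop ps := by
  rw [pvPairLoop, pvPairLoop_shift]; congr 1; ring

theorem pvPair_step (cnt : Int) (ps : List Int) :
    pvPairLoop ((-cnt - 1) :: ps.map (· + 1)) = pvPairLoop ((-(cnt + 1) - 1) :: ps) := by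
  cases ps with
  | nil => simp [pvPairLoop]
  | cons p r =>
    simp only [List.map_cons, pvPairLoop, pvPairLoop_shift]
    congr 1; ring

theorem pvPair_enter (ps : List Int) :
    pvPairLoop (0 :: ps.map (· + 1)) = pvPairLoop ((-(0:Int) - 1) :: ps) := by
  cases ps with
  | nil => simp [pvPairLoop]
  | cons p r =>
    simp only [List.map_cons, pvPairLoop, pvPairLoop_shift]
    congr 1; ring

-- invariant: A's state machine equals blocks ++ pairing of a virtual open fence (if in_block,
-- at index -count-1) followed by the remaining fence positions
theorem pvLoopA_eq (lines : List String) :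
    ∀ (blocks : List Int) (inb : Bool) (cnt : Int),
    pvLoopA lines blocks inb cnt
      = blocks ++ pvPairLoop ((if inb then [-cnt - 1] else []) ++ pvPos lines) := by
  induction lines with
  | nil =>
    intro blocks inb cnt
    cases inb <;> simp [pvLoopA, pvPos, pvPairLoop]
  | cons l rest ih =>
    intro blocks inb cnt
    by_cases h : pvFence l
    · cases inb with
      | true =>
        rw [pvLoopA, if_pos h, if_pos rfl, ih]
        simp only [pvPos, h, if_true, List.singleton_append, pvPair_open]
        simp
      | false =>
        rw [pvLoopA, if_pos h]
        simp only [Bool.false_eq_true, if_false]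
        rw [ih]
        simp only [pvPos, h, if_true, List.nil_append, List.singleton_append, pvPair_enter]
    · cases inb with
      | true =>
        rw [pvLoopA, if_neg h, if_pos rfl, ih]
        simp only [pvPos, h, Bool.false_eq_true, if_false, if_true, List.singleton_append,
          pvPair_step]
      | false =>
        rw [pvLoopA, if_neg h]
        simp only [Bool.false_eq_true, if_false]
        rw [ih]
        simp only [pvPos, h, Bool.false_eq_true, if_false, List.nil_append, pvPairLoop_shift]

-- ===== VERDICT (by name: the statement is the Claim_ definition above) =====
theorem count_code_block_lines_spec : Claim_equal_count_code_block_lines := by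
  intro body _
  unfold Spec_count_code_block_lines count_code_block_lines count_code_block_lines_alt pvPositions
  rw [pvLoopA_eq, pvPositions_eq_pos]
  simp
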